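-- pv_equiv track=rewrite | github.com/pypi-data/pypi-mirror-403 | packages/func2llmtool/func2llmtool-0.0.1-py3-none-any.whl/func2llmtool/docments.py | _parse_param_list
-- ===== SOURCE A (Python) =====
-- import re, sys, types, pprint, functools, textwrap, copy
-- from collections import namedtuple
--
-- NPParameter = namedtuple('Parameter', ['name', 'type', 'desc'])
--
-- def strip_blank_lines(l):
--     "Remove leading and trailing blank lines from a list of lines"
--     while l and not l[0].strip(): del l[0]
--     while l and not l[-1].strip(): del l[-1]
--     return l
--
-- def dedent_lines(lines, split=True):
--     "Deindent a list of lines maximally"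
--     res = textwrap.dedent("\n".join(lines))
--     if split: res = res.split("\n")
--     return res
--
-- class Reader:
--     "A line-based string reader."
--     def __init__(self, data):
--         if isinstance(data, list): self._str = data
--         else: self._str = data.split('\n')
--         self.reset()
--     def __getitem__(self, n): return self._str[n]
--     def reset(self): self._l = 0
--     def read(self):
--         if not self.eof():
--             out = self[self._l]
--             self._l += 1
--             return out
--         else: return ''
--     def seek_next_non_empty_line(self):
--         for l in self[self._l:]:
--             if l.strip(): break
--             else: self._l += 1
--     def eof(self): return self._l >= len(self._str)
--     def read_to_condition(self, condition_func):
--         start = self._l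
--         for line in self[start:]:
--             if condition_func(line): return self[start:self._l]
--             self._l += 1
--             if self.eof(): return self[start:self._l+1]
--         return []
--     def read_to_next_empty_line(self):
--         self.seek_next_non_empty_line()
--         def is_empty(line): return not line.strip()
--         return self.read_to_condition(is_empty)
--     def read_to_next_unindented_line(self):
--         def is_unindented(line): return (line.strip() and (len(line.lstrip()) == len(line)))
--         return self.read_to_condition(is_unindented)
--     def peek(self, n=0):
--         if self._l + n < len(self._str): return self[self._l + n]
--         else: return ''
--     def is_empty(self): return not ''.join(self._str).strip()
--
-- def _parse_param_list(content, single_element_is_type=False):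
--     content = dedent_lines(content)
--     r = Reader(content)
--     params = []
--     while not r.eof():
--         header = r.read().strip()
--         if ' :' in header:
--             arg_name, arg_type = header.split(' :', maxsplit=1)
--             arg_name, arg_type = arg_name.strip(), arg_type.strip()
--         else:
--             if single_element_is_type: arg_name, arg_type = '', header
--             else: arg_name, arg_type = header, ''
--         desc = r.read_to_next_unindented_line()
--         desc = dedent_lines(desc)
--         desc = strip_blank_lines(desc)
--         params.append(NPParameter(arg_name, arg_type, desc))
--     return params
-- ===== SOURCE B (Python) =====
-- import functools
-- from collections import namedtuple
--
-- NPParameter = namedtuple('Parameter', ['name', 'type', 'desc'])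
--
-- def _lcp(a, b):
--     "longest common prefix of two strings"
--     i = 0
--     while i < len(a) and i < len(b) and a[i] == b[i]:
--         i += 1
--     return a[:i]
--
-- def _dedent(lines):
--     "textwrap.dedent on a line list: the margin is the longest common prefix of the [ \\t] indents"
--     norm = ['' if ln and not ln.lstrip(' \t') else ln for ln in lines]
--     indents = [ln[:len(ln) - len(ln.lstrip(' \t'))] for ln in norm if ln.lstrip(' \t')]
--     margin = functools.reduce(_lcp, indents) if indents else ''
--     if margin:
--         return [ln[len(margin):] if ln.startswith(margin) else ln for ln in norm]
--     return norm
--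
-- def _split_header(header, single_element_is_type):
--     if ' :' in header:
--         arg_name, arg_type = header.split(' :', maxsplit=1)
--         return arg_name.strip(), arg_type.strip()
--     if single_element_is_type:
--         return '', header
--     return header, ''
--
-- def _trim(l):
--     "remove leading and trailing blank lines"
--     while l and not l[0].strip():
--         del l[0]
--     while l and not l[-1].strip():
--         del l[-1]
--     return l
--
-- def _parse_param_list(content, single_element_is_type=False):
--     lines = _dedent("\n".join(content).split("\n"))
--     # segment back-to-front: collect pending lines until an unindented non-blank line
--     blocks, pending = [], []
--     for line in reversed(lines):
--         if line and not line[0].isspace():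
--             blocks.append((line, pending))
--             pending = []
--         else:
--             pending = [line] + pending
--     blocks.reverse()
--     if pending:
--         blocks = [(pending[0], pending[1:])] + blocks
--     return [NPParameter(*_split_header(h.strip(), single_element_is_type),
--                         _trim(_dedent("\n".join(body).split("\n"))))
--             for h, body in blocks]
-- ===== Notes on version B (the rewrite author's own statement) =====
-- stated objective: alternative
-- what changed: Replaces A's stateful forward cursor (Reader.read + read_to_next_unindented_line per parameter) with a single reversed-order pass that accumulates pending lines and closes a block at each unindented non-blank line, and replaces textwrap.dedent's margin state machine with a longest-common-prefix reduce over the line indents.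
import Mathlib
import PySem

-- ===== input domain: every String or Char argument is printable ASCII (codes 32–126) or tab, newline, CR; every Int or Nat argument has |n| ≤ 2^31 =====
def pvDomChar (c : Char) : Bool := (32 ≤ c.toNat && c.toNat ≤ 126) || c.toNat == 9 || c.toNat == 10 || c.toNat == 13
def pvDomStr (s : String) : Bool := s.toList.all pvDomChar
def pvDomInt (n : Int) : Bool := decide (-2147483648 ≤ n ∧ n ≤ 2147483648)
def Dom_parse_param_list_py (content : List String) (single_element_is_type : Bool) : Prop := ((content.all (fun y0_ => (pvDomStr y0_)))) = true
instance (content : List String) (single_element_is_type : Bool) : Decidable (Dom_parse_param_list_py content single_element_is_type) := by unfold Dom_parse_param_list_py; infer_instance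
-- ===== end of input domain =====

-- B replaces A's forward cursor (Reader.read + read_to_next_unindented_line) by one
-- reversed-order pass closing a block at each unindented non-blank line, and replaces
-- textwrap.dedent's margin state machine by a longest-common-prefix reduce over the
-- indents; objective: alternative decomposition, same values everywhere.

-- ===== SHARED HELPERS (both Pythons literally share these small pieces:
--       the ' \t' character class, "\n".join + split("\n"), strip_blank_lines and the
--       header ' :'-split rule; each side's own algorithmic parts are ported below) =====

-- ' ' or '\t' (textwrap's regexes use [ \t]; B's lstrip(' \t') strips the same set)
def pvIsWsChar (c : Char) : Bool := c == ' ' || c == '\t'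

-- "\n".join(lines).split("\n")
def pvJoinSplit (lines : List (List Char)) : List (List Char) :=
  PySem.Chars.splitOn (PySem.Chars.join ['\n'] lines) ['\n']

-- a line whose strip() is empty
def pvBlank (l : List Char) : Bool := (PySem.Chars.strip l).isEmpty

-- strip_blank_lines / _trim: drop leading and trailing blank lines
def pvStripBlank (ls : List (List Char)) : List (List Char) :=
  ((ls.dropWhile pvBlank).reverse.dropWhile pvBlank).reverse

-- header.split(' :', maxsplit=1) with both pieces stripped / the single-element rule
def pvHeaderParts (header : List Char) (siet : Bool) : List Char × List Char :=
  if PySem.Chars.isIn [' ', ':'] header then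
    match PySem.Chars.splitOnMax header [' ', ':'] 1 with
    | [a, b] => (PySem.Chars.strip a, PySem.Chars.strip b)
    | _ => ([], [])   -- unreachable: ' :' ∈ header gives exactly two pieces
  else if siet then ([], header) else (header, [])

-- ===== PORT A =====

-- _whitespace_only_re.sub('', text): a nonempty all-[ \t] line becomes ''
def pvNormBlank (l : List Char) : List Char :=
  if l.isEmpty = false && l.all pvIsWsChar then [] else l

-- _leading_whitespace_re: the [ \t]* indent of a line with a following non-[ \t] char
def pvLineIndent? (l : List Char) : Option (List Char) :=
  let ind := l.takeWhile pvIsWsChar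
  if ind.length < l.length then some ind else none

-- dedent's inner loop 'for i, (x, y) in enumerate(zip(margin, indent)): if x != y: …'
def pvCommonCut : List Char → List Char → List Char
  | [], _ => []
  | m, [] => m
  | x :: xs, y :: ys => if x == y then x :: pvCommonCut xs ys else []

-- textwrap.dedent's margin fold
def pvMargin (inds : List (List Char)) : Option (List Char) :=
  inds.foldl (fun m? ind =>
    match m? with
    | none => some ind
    | some m =>
      if m.isPrefixOf ind then some m
      else if ind.isPrefixOf m then some ind
      else some (pvCommonCut m ind)) none

-- textwrap.dedent on the already-split logical lines (exact: blank normalisation,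
-- margin computation and '(?m)^margin' removal are all per line)
def pvDedentCore (ls : List (List Char)) : List (List Char) :=
  let ls := ls.map pvNormBlank
  match pvMargin (ls.filterMap pvLineIndent?) with
  | none => ls
  | some m =>
    if m.isEmpty then ls
    else ls.map (fun l => if m.isPrefixOf l then l.drop m.length else l)

-- dedent_lines(lines) = textwrap.dedent("\n".join(lines)).split("\n")
def pvDedentLinesA (lines : List (List Char)) : List (List Char) :=
  pvDedentCore (pvJoinSplit lines)

-- is_unindented(line) = line.strip() and len(line.lstrip()) == len(line)
def pvIsUnindentedA (l : List Char) : Bool :=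
  !(PySem.Chars.strip l).isEmpty && ((PySem.Chars.lstrip l).length == l.length)

-- Reader.read_to_condition with is_unindented: (consumed lines, rest)
def pvReadToCond : List (List Char) → List (List Char) × List (List Char)
  | [] => ([], [])
  | l :: t =>
    if pvIsUnindentedA l then ([], l :: t)
    else
      let p := pvReadToCond t
      (l :: p.1, p.2)

theorem pvReadToCond_snd_length_le (rest : List (List Char)) :
    (pvReadToCond rest).2.length ≤ rest.length := by
  induction rest with
  | nil => simp [pvReadToCond]
  | cons l t ih =>
    by_cases h : pvIsUnindentedA l
    · simp [pvReadToCond, h]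
    · simp only [pvReadToCond, h]
      simpa using Nat.le_succ_of_le ih

-- A's while-loop over the Reader: read a header, read the desc to the next unindented line
def pvALoop (rest : List (List Char)) (siet : Bool) :
    List (List Char × List Char × List (List Char)) :=
  match rest with
  | [] => []
  | h :: t =>
    let nt := pvHeaderParts (PySem.Chars.strip h) siet
    let p := pvReadToCond t
    (nt.1, nt.2, pvStripBlank (pvDedentLinesA p.1)) :: pvALoop p.2 siet
termination_by rest.length
decreasing_by
  simpa using Nat.lt_succ_of_le (pvReadToCond_snd_length_le t)

def parse_param_list_py (content : List String) (single_element_is_type : Bool) :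
    List (String × String × List String) :=
  (pvALoop (pvDedentLinesA (content.map String.toList)) single_element_is_type).map
    (fun r => (String.ofList r.1, String.ofList r.2.1, r.2.2.map String.ofList))

-- ===== PORT B =====

-- _lcp: longest common prefix of two strings
def pvBLcp : List Char → List Char → List Char
  | _, [] => []
  | [], _ => []
  | x :: xs, y :: ys => if x == y then x :: pvBLcp xs ys else []

-- B's _dedent: normalise blank lines, reduce the indents by _lcp, strip the margin
def pvBDedent (lines : List (List Char)) : List (List Char) :=
  let norm := lines.map (fun ln => if !ln.isEmpty && (ln.dropWhile pvIsWsChar).isEmpty then [] else ln)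
  let indents := (norm.filter (fun ln => !(ln.dropWhile pvIsWsChar).isEmpty)).map
    (fun ln => ln.takeWhile pvIsWsChar)    -- ln[:len(ln)-len(ln.lstrip(' \t'))]
  let margin := match indents with | [] => [] | h :: t => t.foldl pvBLcp h
  if margin.isEmpty then norm
  else norm.map (fun ln => if PySem.Chars.startswith ln margin then ln.drop margin.length else ln)

def pvBDedentLines (lines : List (List Char)) : List (List Char) :=
  pvBDedent (pvJoinSplit lines)

-- line and not line[0].isspace()
def pvBStarts : List Char → Bool
  | [] => false
  | c :: _ => !PySem.Chars.isspace c

-- one step of B's reversed loop over the lines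
def pvBStep (st : List (List Char × List (List Char)) × List (List Char)) (line : List Char) :
    List (List Char × List (List Char)) × List (List Char) :=
  if pvBStarts line then (st.1 ++ [(line, st.2)], []) else (st.1, line :: st.2)

-- B's segmentation: reversed fold, then reverse the blocks and flush the pending lines
def pvBSegment (lines : List (List Char)) : List (List Char × List (List Char)) :=
  let st := lines.reverse.foldl pvBStep ([], [])
  match st.2 with
  | [] => st.1.reverse
  | h :: t => (h, t) :: st.1.reverse

def parse_param_list_py_alt (content : List String) (single_element_is_type : Bool) :
    List (String × String × List String) :=
  (pvBSegment (pvBDedentLines (content.map String.toList))).map (fun b =>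
    let nt := pvHeaderParts (PySem.Chars.strip b.1) single_element_is_type
    (String.ofList nt.1, String.ofList nt.2,
      (pvStripBlank (pvBDedentLines b.2)).map String.ofList))

-- ===== PRECONDITION & SPEC =====
def Spec_parse_param_list_py (content : List String) (single_element_is_type : Bool) (out : List (String × String × List String)) : Prop := out = parse_param_list_py_alt content single_element_is_type
instance (content : List String) (single_element_is_type : Bool) (out : List (String × String × List String)) : Decidable (Spec_parse_param_list_py content single_element_is_type out) := by unfold Spec_parse_param_list_py; infer_instance

-- ===== CLAIM (what is proved, stated in full; the proofs are below) =====
def Claim_equal_parse_param_list_py : Prop := ∀ (content : List String) (single_element_is_type : Bool), Dom_parse_param_list_py content single_element_is_type → Spec_parse_param_list_py content single_element_is_type (parse_param_list_py content single_element_is_type)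

-- ===== LEMMAS AND PROOFS =====

-- the two line tests agree: l nonempty with a non-space first char
theorem pvBStarts_eq : pvBStarts = pvIsUnindentedA := by
  funext l
  cases l with
  | nil => simp [pvBStarts, pvIsUnindentedA, PySem.Chars.strip, PySem.Chars.lstrip,
      PySem.Chars.rstrip]
  | cons c t =>
    by_cases hc : PySem.Chars.isspace c
    · have hle : (List.dropWhile PySem.Chars.isspace t).length ≤ t.length :=
        t.length_dropWhile_le PySem.Chars.isspace
      simp [pvBStarts, pvIsUnindentedA, PySem.Chars.lstrip, hc]
      intro _
      omega
    · have hne : PySem.Chars.rstrip (c :: t) ≠ [] := by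
        intro h
        have : ∀ x ∈ (c :: t).reverse, PySem.Chars.isspace x := by
          have h' : List.dropWhile PySem.Chars.isspace (c :: t).reverse = [] := by
            have := congrArg List.reverse h
            simpa [PySem.Chars.rstrip] using this
          exact List.dropWhile_eq_nil_iff.mp h'
        have := this c (by simp)
        simp [hc] at this
      simp [pvBStarts, pvIsUnindentedA, PySem.Chars.strip, PySem.Chars.lstrip, hc, hne]

-- helper facts for the dedent equivalence
theorem pvDropWs_isEmpty (ln : List Char) :
    (ln.dropWhile pvIsWsChar).isEmpty = ln.all pvIsWsChar := by
  rw [Bool.eq_iff_iff]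
  simp [List.isEmpty_iff, List.dropWhile_eq_nil_iff, List.all_eq_true]

theorem pvLineIndent?_eq (ln : List Char) :
    pvLineIndent? ln =
      if (ln.dropWhile pvIsWsChar).isEmpty then none else some (ln.takeWhile pvIsWsChar) := by
  have hlen : (ln.takeWhile pvIsWsChar).length + (ln.dropWhile pvIsWsChar).length = ln.length := by
    conv_rhs => rw [← List.takeWhile_append_dropWhile (p := pvIsWsChar) (l := ln)]
    rw [List.length_append]
  unfold pvLineIndent?
  by_cases h : (ln.dropWhile pvIsWsChar).isEmpty
  · have h0 : (ln.dropWhile pvIsWsChar).length = 0 := by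
      rw [List.isEmpty_iff] at h; simp [h]
    simp only [h, if_true]
    have : ¬ (ln.takeWhile pvIsWsChar).length < ln.length := by omega
    simp [this]
  · have h0 : 0 < (ln.dropWhile pvIsWsChar).length := by
      rcases Nat.eq_zero_or_pos (ln.dropWhile pvIsWsChar).length with h1 | h1
      · exact absurd (by simpa [List.isEmpty_iff] using List.length_eq_zero_iff.mp h1) h
      · exact h1
    have : (ln.takeWhile pvIsWsChar).length < ln.length := by omega
    simp [h, this]

theorem pvIndents_eq (ls : List (List Char)) :
    (ls.filter (fun ln => !(ln.dropWhile pvIsWsChar).isEmpty)).map (fun ln => ln.takeWhile pvIsWsChar)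
      = ls.filterMap pvLineIndent? := by
  induction ls with
  | nil => simp
  | cons ln t ih =>
    by_cases h : (ln.dropWhile pvIsWsChar).isEmpty = true
    · rw [List.filter_cons, List.filterMap_cons, pvLineIndent?_eq, if_pos h]
      simp only [h, Bool.not_true, Bool.false_eq_true, if_false]
      exact ih
    · have hb : (ln.dropWhile pvIsWsChar).isEmpty = false := Bool.eq_false_iff.mpr h
      rw [List.filter_cons, List.filterMap_cons, pvLineIndent?_eq, if_neg h]
      simp only [hb, Bool.not_false, if_true, List.map_cons]
      rw [ih]

theorem pvBLcp_of_prefix_left (m ind : List Char) (h : m <+: ind) : pvBLcp m ind = m := by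
  induction m generalizing ind with
  | nil => cases ind <;> simp [pvBLcp]
  | cons x xs ih =>
    rcases ind with _ | ⟨y, ys⟩
    · simp at h
    · rcases List.cons_prefix_cons.mp h with ⟨rfl, h2⟩
      simp [pvBLcp, ih ys h2]

theorem pvBLcp_of_prefix_right (m ind : List Char) (h : ind <+: m) : pvBLcp m ind = ind := by
  induction ind generalizing m with
  | nil => cases m <;> simp [pvBLcp]
  | cons y ys ih =>
    rcases m with _ | ⟨x, xs⟩
    · simp at h
    · rcases List.cons_prefix_cons.mp h with ⟨rfl, h2⟩
      simp [pvBLcp, ih xs h2]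

theorem pvCommonCut_eq (m ind : List Char) (h1 : ¬ m <+: ind) (h2 : ¬ ind <+: m) :
    pvCommonCut m ind = pvBLcp m ind := by
  induction m generalizing ind with
  | nil => exact absurd (List.nil_prefix) h1
  | cons x xs ih =>
    rcases ind with _ | ⟨y, ys⟩
    · exact absurd (List.nil_prefix) h2
    · by_cases hxy : x = y
      · subst hxy
        have h1' : ¬ xs <+: ys := fun h => h1 (List.cons_prefix_cons.mpr ⟨rfl, h⟩)
        have h2' : ¬ ys <+: xs := fun h => h2 (List.cons_prefix_cons.mpr ⟨rfl, h⟩)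
        simp [pvCommonCut, pvBLcp, ih ys h1' h2']
      · simp [pvCommonCut, pvBLcp, hxy]

theorem pvMarginStep_eq (m ind : List Char) :
    (if m.isPrefixOf ind then some m
     else if ind.isPrefixOf m then some ind
     else some (pvCommonCut m ind)) = some (pvBLcp m ind) := by
  by_cases h1 : m <+: ind
  · simp [List.isPrefixOf_iff_prefix.mpr h1, pvBLcp_of_prefix_left m ind h1]
  · by_cases h2 : ind <+: m
    · have hb1 : m.isPrefixOf ind = false := by
        rw [Bool.eq_false_iff]; intro h; exact h1 (List.isPrefixOf_iff_prefix.mp h)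
      simp [hb1, List.isPrefixOf_iff_prefix.mpr h2, pvBLcp_of_prefix_right m ind h2]
    · have hb1 : m.isPrefixOf ind = false := by
        rw [Bool.eq_false_iff]; intro h; exact h1 (List.isPrefixOf_iff_prefix.mp h)
      have hb2 : ind.isPrefixOf m = false := by
        rw [Bool.eq_false_iff]; intro h; exact h2 (List.isPrefixOf_iff_prefix.mp h)
      simp [hb1, hb2, pvCommonCut_eq m ind h1 h2]

theorem pvMargin_cons (h : List Char) (t : List (List Char)) :
    pvMargin (h :: t) = some (t.foldl pvBLcp h) := by
  unfold pvMargin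
  rw [List.foldl_cons]
  induction t generalizing h with
  | nil => simp
  | cons i t ih =>
    rw [List.foldl_cons, List.foldl_cons]
    have := pvMarginStep_eq h i
    simp only at this ⊢
    rw [this]
    exact ih (pvBLcp h i)

-- B's _dedent is textwrap.dedent
theorem pvBDedent_eq (ls : List (List Char)) : pvBDedent ls = pvDedentCore ls := by
  unfold pvBDedent pvDedentCore
  dsimp only
  have hnorm : (ls.map (fun ln => if !ln.isEmpty && (ln.dropWhile pvIsWsChar).isEmpty then [] else ln))
      = ls.map pvNormBlank := by
    apply List.map_congr_left
    intro ln _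
    simp [pvNormBlank, pvDropWs_isEmpty]
  rw [hnorm, pvIndents_eq]
  cases hi : (ls.map pvNormBlank).filterMap pvLineIndent? with
  | nil => simp [pvMargin]
  | cons h t =>
    rw [pvMargin_cons]
    by_cases hm : (t.foldl pvBLcp h).isEmpty
    · have : t.foldl pvBLcp h = [] := List.isEmpty_iff.mp hm
      simp [this]
    · have hne : ¬ (t.foldl pvBLcp h) = [] := by
        intro h'; rw [h'] at hm; simp at hm
      have hb : (t.foldl pvBLcp h).isEmpty = false := Bool.eq_false_iff.mpr hm
      simp only [hb, Bool.false_eq_true, if_false]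
      apply List.map_congr_left
      intro ln _
      by_cases hp : (t.foldl pvBLcp h) <+: ln
      · simp [(PySem.Chars.startswith_iff _ _).mpr hp, List.isPrefixOf_iff_prefix.mpr hp]
      · have hb1 : PySem.Chars.startswith ln (t.foldl pvBLcp h) = false := by
          rw [Bool.eq_false_iff]; intro h'; exact hp ((PySem.Chars.startswith_iff _ _).mp h')
        have hb2 : (t.foldl pvBLcp h).isPrefixOf ln = false := by
          rw [Bool.eq_false_iff]; intro h'; exact hp (List.isPrefixOf_iff_prefix.mp h')
        simp [hb1, hb2]

theorem pvBDedentLines_eq : pvBDedentLines = pvDedentLinesA := by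
  funext ls; unfold pvBDedentLines pvDedentLinesA; rw [pvBDedent_eq]

-- the common segmentation: (header line, following non-boundary lines)*
def pvSegs : List (List Char) → List (List Char × List (List Char))
  | [] => []
  | h :: t =>
    (h, t.takeWhile (fun l => !pvIsUnindentedA l)) ::
      pvSegs (t.dropWhile (fun l => !pvIsUnindentedA l))
termination_by ls => ls.length
decreasing_by
  simpa using Nat.lt_succ_of_le (t.length_dropWhile_le _)

theorem pvReadToCond_eq (rest : List (List Char)) :
    pvReadToCond rest =
      (rest.takeWhile (fun l => !pvIsUnindentedA l), rest.dropWhile (fun l => !pvIsUnindentedA l)) := by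
  induction rest with
  | nil => simp [pvReadToCond]
  | cons l t ih =>
    by_cases h : pvIsUnindentedA l
    · simp [pvReadToCond, h]
    · simp [pvReadToCond, h, ih]

theorem pvALoop_eq_segs (siet : Bool) :
    ∀ (n : Nat) (rest : List (List Char)), rest.length ≤ n →
      pvALoop rest siet =
        (pvSegs rest).map (fun b =>
          let nt := pvHeaderParts (PySem.Chars.strip b.1) siet
          (nt.1, nt.2, pvStripBlank (pvDedentLinesA b.2))) := by
  intro n
  induction n with
  | zero =>
    intro rest h
    have : rest = [] := List.length_eq_zero_iff.mp (Nat.le_zero.mp h)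
    subst this
    simp [pvALoop, pvSegs]
  | succ n ih =>
    intro rest h
    match rest with
    | [] => simp [pvALoop, pvSegs]
    | h' :: t =>
      rw [pvALoop, pvSegs]
      rw [pvReadToCond_eq]
      have hlen : (t.dropWhile (fun l => !pvIsUnindentedA l)).length ≤ n := by
        have := t.length_dropWhile_le (fun l => !pvIsUnindentedA l)
        simp only [List.length_cons] at h
        omega
      rw [List.map_cons, ih _ hlen]

-- B's reversed fold computes (blocks of the unindented tail, leading pending lines)
theorem pvBFold_eq (lines : List (List Char)) :
    lines.reverse.foldl pvBStep ([], []) =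
      ((pvSegs (lines.dropWhile (fun l => !pvIsUnindentedA l))).reverse,
        lines.takeWhile (fun l => !pvIsUnindentedA l)) := by
  induction lines with
  | nil => simp [pvSegs]
  | cons l t ih =>
    rw [List.reverse_cons, List.foldl_append, ih, List.foldl_cons, List.foldl_nil]
    by_cases h : pvIsUnindentedA l
    · have hs : pvBStarts l = true := by rw [pvBStarts_eq]; exact h
      rw [List.dropWhile_cons, List.takeWhile_cons]
      simp only [pvBStep, hs, h, Bool.not_true, if_true, Bool.false_eq_true, if_false]
      rw [pvSegs]
      simp
    · have hs : pvBStarts l = false := by rw [pvBStarts_eq]; simpa using h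
      rw [List.dropWhile_cons, List.takeWhile_cons]
      simp [pvBStep, hs, h]

theorem pvBSegment_eq (lines : List (List Char)) : pvBSegment lines = pvSegs lines := by
  unfold pvBSegment
  rw [pvBFold_eq]
  cases htw : lines.takeWhile (fun l => !pvIsUnindentedA l) with
  | nil =>
    have hd : lines.dropWhile (fun l => !pvIsUnindentedA l) = lines := by
      have := List.takeWhile_append_dropWhile (p := fun l => !pvIsUnindentedA l) (l := lines)
      rw [htw] at this; simpa using this
    simp [hd]
  | cons h t =>
    simp only [List.reverse_reverse]
    have hsplit : lines = (h :: t) ++ lines.dropWhile (fun l => !pvIsUnindentedA l) := by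
      conv_lhs => rw [← List.takeWhile_append_dropWhile (p := fun l => !pvIsUnindentedA l) (l := lines)]
      rw [htw]
    have hall : ∀ x ∈ h :: t, (fun l => !pvIsUnindentedA l) x = true := by
      intro x hx
      have hx' : x ∈ lines.takeWhile (fun l => !pvIsUnindentedA l) := by rw [htw]; exact hx
      exact List.mem_takeWhile_imp (p := fun l => !pvIsUnindentedA l) hx'
    have hallt : ∀ x ∈ t, (fun l => !pvIsUnindentedA l) x = true :=
      fun x hx => hall x (List.mem_cons_of_mem _ hx)
    conv_rhs => rw [hsplit, List.cons_append]
    rw [pvSegs]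
    have hD := List.takeWhile_append_dropWhile
      (p := fun l => !pvIsUnindentedA l) (l := lines.dropWhile (fun l => !pvIsUnindentedA l))
    rw [List.dropWhile_idempotent] at hD
    have htake0 : (lines.dropWhile (fun l => !pvIsUnindentedA l)).takeWhile
        (fun l => !pvIsUnindentedA l) = [] :=
      List.append_cancel_right (hD.trans (List.nil_append _).symm)
    congr 1
    · congr 1
      rw [List.takeWhile_append_of_pos hallt, htake0]
      simp
    · congr 1
      rw [List.dropWhile_append_of_pos hallt, List.dropWhile_idempotent]

-- ===== VERDICT (by name: the statement is the Claim_ definition above) =====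
theorem parse_param_list_py_spec : Claim_equal_parse_param_list_py := by
  intro content siet _
  unfold Spec_parse_param_list_py parse_param_list_py parse_param_list_py_alt
  rw [pvBSegment_eq, pvBDedentLines_eq,
    pvALoop_eq_segs siet (pvDedentLinesA (content.map String.toList)).length _ le_rfl,
    List.map_map]
  rfl
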